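-- pv_equiv track=rewrite | github.com/jgsim/algorithm-study | leetcode-contest/319/2470_Number of Subarrays With LCM Equal to K/jgsim.py | subarrayLCM
-- ===== SOURCE A (Python) =====
-- from typing import List
-- from math import lcm
--
-- def subarrayLCM(nums: List[int], k: int) -> int:
--     count = 0
--     for i in range(len(nums)):
--         l = nums[i]
--         for j in range(i, len(nums)):
--             l = lcm(l, nums[j])
--             if l == k:
--                 count += 1
--             if l > k:
--                 break
--     return count
-- ===== SOURCE B (Python) =====
-- from math import lcm
--
-- def subarrayLCM(nums, k):
--     # single left-to-right pass: maintain the LCMs (all <= k) of still-viable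
--     # subarrays ending at the previous element, extend them with x, prune > k
--     total = 0
--     cur = []
--     for x in nums:
--         cur = [w for w in (lcm(v, x) for v in cur + [x]) if w <= k]
--         total += cur.count(k)
--     return total
-- ===== Notes on version B (the rewrite author's own statement) =====
-- stated objective: alternative
-- what changed: Replaces the per-start restart (outer loop over start index, inner loop recomputing LCMs with break) by a single left-to-right pass that carries the list of LCM values of still-viable subarrays ending at the current element, pruning values above k.
import Mathlib
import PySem

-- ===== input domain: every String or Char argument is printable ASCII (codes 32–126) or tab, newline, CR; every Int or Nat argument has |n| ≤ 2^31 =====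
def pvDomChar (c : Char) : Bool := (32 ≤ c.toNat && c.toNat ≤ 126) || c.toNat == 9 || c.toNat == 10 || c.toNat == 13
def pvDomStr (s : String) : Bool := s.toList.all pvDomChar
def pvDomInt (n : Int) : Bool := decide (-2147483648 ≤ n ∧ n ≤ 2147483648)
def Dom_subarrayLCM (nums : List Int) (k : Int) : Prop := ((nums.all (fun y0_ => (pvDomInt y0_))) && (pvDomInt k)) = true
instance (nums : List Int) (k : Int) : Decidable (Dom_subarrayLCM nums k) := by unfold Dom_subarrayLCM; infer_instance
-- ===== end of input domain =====

-- B replaces A's per-start restart (outer loop over starts, inner LCM loop with break)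
-- by one left-to-right pass carrying the LCMs of still-viable subarrays ending here (objective: alternative).

-- ===== PORT A =====
-- inner loop 'for j in range(i, len(nums))': l is the running lcm, count the shared counter,
-- the 'break' is the early return of count'
def pvAInner (k l count : Int) : List Int → Int
  | [] => count
  | x :: rest =>
    let l' : Int := (Int.lcm l x : Int)   -- math.lcm(l, x): nonnegative, = lcm of absolute values
    let count' : Int := if l' = k then count + 1 else count
    if l' > k then count' else pvAInner k l' count' rest

-- outer loop 'for i in range(len(nums))': iterate over suffixes; l starts as nums[i] (the head)
def pvAOuter (k count : Int) : List Int → Int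
  | [] => count
  | x :: rest => pvAOuter k (pvAInner k x count (x :: rest)) rest

def subarrayLCM (nums : List Int) (k : Int) : Int := pvAOuter k 0 nums

-- ===== PORT B =====
-- cur = [w for w in (lcm(v, x) for v in cur + [x]) if w <= k]
def pvBStep (k : Int) (cur : List Int) (x : Int) : List Int :=
  ((cur ++ [x]).map (fun v => (Int.lcm v x : Int))).filter (fun w => w ≤ k)

def subarrayLCM_alt (nums : List Int) (k : Int) : Int :=
  (nums.foldl
    (fun (st : Int × List Int) x =>
      let cur := pvBStep k st.2 x
      (st.1 + (cur.count k : Int), cur))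
    (0, [])).1

-- ===== PRECONDITION & SPEC =====
def Spec_subarrayLCM (nums : List Int) (k : Int) (out : Int) : Prop := out = subarrayLCM_alt nums k
instance (nums : List Int) (k : Int) (out : Int) : Decidable (Spec_subarrayLCM nums k out) := by unfold Spec_subarrayLCM; infer_instance

-- ===== CLAIM (what is proved, stated in full; the proofs are below) =====
def Claim_equal_subarrayLCM : Prop := ∀ (nums : List Int) (k : Int), Dom_subarrayLCM nums k → Spec_subarrayLCM nums k (subarrayLCM nums k)

-- ===== LEMMAS AND PROOFS =====

-- pvH k l xs: matches contributed by extending a running lcm l through xs, with A's break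
def pvH (k l : Int) : List Int → Int
  | [] => 0
  | x :: rest =>
    let w : Int := (Int.lcm l x : Int)
    if w > k then (if w = k then 1 else 0)
    else (if w = k then 1 else 0) + pvH k w rest

theorem pvAInner_acc (k : Int) (xs : List Int) : ∀ l c, pvAInner k l c xs = c + pvH k l xs := by
  induction xs with
  | nil => intro l c; simp [pvAInner, pvH]
  | cons x rest ih =>
    intro l c
    simp only [pvAInner, pvH]
    by_cases hk : ((Int.lcm l x : Int) > k) <;> by_cases he : ((Int.lcm l x : Int) = k) <;>
      simp [hk, he, ih] <;> ring

theorem pvAOuter_acc (k : Int) (xs : List Int) : ∀ c, pvAOuter k c xs = c + pvAOuter k 0 xs := by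
  induction xs with
  | nil => intro c; simp [pvAOuter]
  | cons x rest ih =>
    intro c
    simp only [pvAOuter]
    rw [ih, ih (pvAInner k x 0 (x :: rest)), pvAInner_acc, pvAInner_acc]
    ring

theorem pv_sum_map_add (f g : Int → Int) (L : List Int) :
    (L.map f).sum + (L.map g).sum = (L.map (fun v => f v + g v)).sum := by
  induction L with
  | nil => simp
  | cons a t ih => simp [ih.symm]; ring

theorem pv_count_as_sum (k : Int) (L : List Int) :
    (L.count k : Int) = (L.map (fun w => if w = k then (1 : Int) else 0)).sum := by
  induction L with
  | nil => simp
  | cons a t ih =>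
    by_cases h : a = k <;> simp [h, ih]; ring

theorem pv_sum_filter_map (p : Int → Bool) (g m : Int → Int) (L : List Int) :
    (((L.map m).filter p).map g).sum = (L.map (fun v => if p (m v) then g (m v) else 0)).sum := by
  induction L with
  | nil => simp
  | cons a t ih =>
    by_cases h : p (m a) <;> simp [h, ih]

theorem pv_step_sum (k x : Int) (r : List Int) (cur : List Int) :
    ((pvBStep k cur x).count k : Int) + ((pvBStep k cur x).map (fun v => pvH k v r)).sum
      = (cur.map (fun v => pvH k v (x :: r))).sum + pvH k x (x :: r) := by
  rw [pv_count_as_sum, pv_sum_map_add]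
  unfold pvBStep
  rw [pv_sum_filter_map]
  have hpt : ∀ v : Int,
      (if ((Int.lcm v x : Int) ≤ k : Bool) then
          (if (Int.lcm v x : Int) = k then (1 : Int) else 0) + pvH k (Int.lcm v x : Int) r
        else 0)
        = pvH k v (x :: r) := by
    intro v
    simp only [pvH]
    by_cases h : (Int.lcm v x : Int) ≤ k
    · simp [h, not_lt.mpr h]
    · have hne : ¬ ((Int.lcm v x : Int) = k) := fun he => h (le_of_eq he)
      simp [h, lt_of_not_ge h, hne]
  calc (((cur ++ [x]).map (fun v =>
        if ((Int.lcm v x : Int) ≤ k : Bool) then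
          (if (Int.lcm v x : Int) = k then (1 : Int) else 0) + pvH k (Int.lcm v x : Int) r
        else 0)).sum)
      = (((cur ++ [x]).map (fun v => pvH k v (x :: r))).sum) := by
        exact congrArg List.sum (List.map_congr_left (fun v _ => hpt v))
    _ = (cur.map (fun v => pvH k v (x :: r))).sum + pvH k x (x :: r) := by
        simp

theorem pv_main (k : Int) (xs : List Int) : ∀ (t : Int) (cur : List Int),
    (xs.foldl
      (fun (st : Int × List Int) x =>
        let c := pvBStep k st.2 x
        (st.1 + (c.count k : Int), c))
      (t, cur)).1
    = t + (cur.map (fun v => pvH k v xs)).sum + pvAOuter k 0 xs := by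
  induction xs with
  | nil => intro t cur; simp [pvAOuter, pvH]
  | cons x r ih =>
    intro t cur
    simp only [List.foldl_cons]
    rw [ih]
    have houter : pvAOuter k 0 (x :: r) = pvH k x (x :: r) + pvAOuter k 0 r := by
      simp only [pvAOuter]
      rw [pvAOuter_acc, pvAInner_acc]
      ring
    rw [houter]
    linarith [pv_step_sum k x r cur]

-- ===== VERDICT (by name: the statement is the Claim_ definition above) =====
theorem subarrayLCM_spec : Claim_equal_subarrayLCM := by
  intro nums k _
  unfold Spec_subarrayLCM subarrayLCM subarrayLCM_alt
  rw [pv_main]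
  simp
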